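-- pv_equiv track=rewrite | github.com/Madmax729/NETRA-Decentralized-AI-Content-Ownership-Registry | server/plagiarism/extractor.py | _find_word_position
-- ===== SOURCE A (Python) =====
-- def _find_word_position(text: str, words: list, word_index: int) -> int:
--     """Find the character position of the Nth word in the original text."""
--     if word_index < 0 or word_index >= len(words):
--         return -1
--
--     pos = 0
--     current_word = 0
--
--     while pos < len(text) and current_word < word_index:
--         # Skip whitespace
--         while pos < len(text) and text[pos] in " \t\n\r":
--             pos += 1
--         # Skip word
--         while pos < len(text) and text[pos] not in " \t\n\r":
--             pos += 1
--         current_word += 1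
--
--     # Skip whitespace before the target word
--     while pos < len(text) and text[pos] in " \t\n\r":
--         pos += 1
--
--     return pos
-- ===== SOURCE B (Python) =====
-- def _find_word_position(text: str, words: list, word_index: int) -> int:
--     """Find the character position of the Nth word in the original text."""
--     if word_index < 0 or word_index >= len(words):
--         return -1
--     ws = " \t\n\r"
--     starts = [i for i, c in enumerate(text)
--               if c not in ws and (i == 0 or text[i - 1] in ws)]
--     if word_index < len(starts):
--         return starts[word_index]
--     return len(text)
-- ===== Notes on version B (the rewrite author's own statement) =====
-- stated objective: alternative
-- what changed: Replaces the incremental alternating skip-whitespace/skip-word cursor scan with one pass that lists every word-start index (a char that is non-whitespace with a whitespace/none predecessor) and then simply indexes the Nth, defaulting to len(text).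
import Mathlib
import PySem

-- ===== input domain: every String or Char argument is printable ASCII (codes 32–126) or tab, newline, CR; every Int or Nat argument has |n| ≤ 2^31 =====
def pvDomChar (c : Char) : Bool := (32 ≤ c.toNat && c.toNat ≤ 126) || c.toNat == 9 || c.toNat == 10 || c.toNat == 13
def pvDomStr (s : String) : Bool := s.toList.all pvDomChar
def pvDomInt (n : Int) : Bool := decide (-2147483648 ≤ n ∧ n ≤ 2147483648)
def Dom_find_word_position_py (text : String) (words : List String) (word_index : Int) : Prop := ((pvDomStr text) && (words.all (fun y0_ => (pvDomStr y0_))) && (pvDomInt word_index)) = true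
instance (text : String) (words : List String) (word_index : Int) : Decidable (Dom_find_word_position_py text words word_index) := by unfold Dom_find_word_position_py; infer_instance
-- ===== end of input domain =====

-- B replaces A's alternating skip-whitespace/skip-word cursor scan by one pass that
-- lists all word-start indices and indexes the Nth (objective: alternative; same cost).

-- the whitespace set " \t\n\r" of the Python source
def pvWs : List Char := [' ', '\t', '\n', '\r']

-- ===== PORT A =====
-- while pos < len(text) and text[pos] in " \t\n\r": pos += 1
def pvSkipWs (cs : List Char) (pos : Nat) : Nat :=
  if h : pos < cs.length ∧ pvWs.contains (cs.getD pos ' ') = true then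
    pvSkipWs cs (pos + 1)
  else pos
termination_by cs.length - pos
decreasing_by omega

-- while pos < len(text) and text[pos] not in " \t\n\r": pos += 1
def pvSkipWord (cs : List Char) (pos : Nat) : Nat :=
  if h : pos < cs.length ∧ pvWs.contains (cs.getD pos ' ') = false then
    pvSkipWord cs (pos + 1)
  else pos
termination_by cs.length - pos
decreasing_by omega

-- the outer while loop: skip whitespace then a word, word_index times
def pvALoop (cs : List Char) (pos cw wi : Nat) : Nat :=
  if pos < cs.length ∧ cw < wi then
    pvALoop cs (pvSkipWord cs (pvSkipWs cs pos)) (cw + 1) wi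
  else pos
termination_by wi - cw
decreasing_by omega

def find_word_position_py (text : String) (words : List String) (word_index : Int) : Int :=
  if word_index < 0 ∨ (words.length : Int) ≤ word_index then -1
  else
    let cs := text.toList
    ((pvSkipWs cs (pvALoop cs 0 0 word_index.toNat) : Nat) : Int)

-- ===== PORT B =====
-- the comprehension's condition: c not in ws and (i == 0 or text[i-1] in ws)
def pvStartB? (cs : List Char) (p : Int × Char) : Option Int :=
  if pvWs.contains p.2 = false ∧ (p.1 = 0 ∨ pvWs.contains (cs.getD (p.1 - 1).toNat ' ') = true)
  then some p.1 else none

def find_word_position_py_alt (text : String) (words : List String) (word_index : Int) : Int :=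
  if word_index < 0 ∨ (words.length : Int) ≤ word_index then -1
  else
    let cs := text.toList
    let starts := (PySem.List.enumerate cs).filterMap (pvStartB? cs)
    if word_index < (starts.length : Int) then starts.getD word_index.toNat 0
    else (cs.length : Int)

-- ===== PRECONDITION & SPEC =====
def Spec_find_word_position_py (text : String) (words : List String) (word_index : Int) (out : Int) : Prop := out = find_word_position_py_alt text words word_index
instance (text : String) (words : List String) (word_index : Int) (out : Int) : Decidable (Spec_find_word_position_py text words word_index out) := by unfold Spec_find_word_position_py; infer_instance

-- ===== CLAIM (what is proved, stated in full; the proofs are below) =====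
def Claim_equal_find_word_position_py : Prop := ∀ (text : String) (words : List String) (word_index : Int), Dom_find_word_position_py text words word_index → Spec_find_word_position_py text words word_index (find_word_position_py text words word_index)

-- ===== LEMMAS AND PROOFS =====

lemma pvSkipWs_ge (cs : List Char) (pos : Nat) : pos ≤ pvSkipWs cs pos := by
  fun_induction pvSkipWs cs pos with
  | case1 pos h ih => omega
  | case2 pos h => omega

lemma pvSkipWord_ge (cs : List Char) (pos : Nat) : pos ≤ pvSkipWord cs pos := by
  fun_induction pvSkipWord cs pos with
  | case1 pos h ih => omega
  | case2 pos h => omega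

lemma pvSkipWs_le_len (cs : List Char) (pos : Nat) (h : pos ≤ cs.length) :
    pvSkipWs cs pos ≤ cs.length := by
  fun_induction pvSkipWs cs pos with
  | case1 pos h' ih => exact ih (by omega)
  | case2 pos h' => exact h

lemma pvSkipWord_le_len (cs : List Char) (pos : Nat) (h : pos ≤ cs.length) :
    pvSkipWord cs pos ≤ cs.length := by
  fun_induction pvSkipWord cs pos with
  | case1 pos h' ih => exact ih (by omega)
  | case2 pos h' => exact h

lemma pvSkipWs_stop (cs : List Char) (pos : Nat) (h : pvSkipWs cs pos < cs.length) :
    pvWs.contains (cs.getD (pvSkipWs cs pos) ' ') = false := by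
  fun_induction pvSkipWs cs pos with
  | case1 pos h' ih => exact ih h
  | case2 pos h' =>
    by_cases hp : pos < cs.length
    · simpa [hp] using h'
    · omega

lemma pvSkipWord_stop (cs : List Char) (pos : Nat) (h : pvSkipWord cs pos < cs.length) :
    pvWs.contains (cs.getD (pvSkipWord cs pos) ' ') = true := by
  fun_induction pvSkipWord cs pos with
  | case1 pos h' ih => exact ih h
  | case2 pos h' =>
    by_cases hp : pos < cs.length
    · by_cases hw : pvWs.contains (cs.getD pos ' ') = true
      · exact hw
      · exact absurd ⟨hp, by simpa using hw⟩ h'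
    · omega

lemma pvSkipWs_mid (cs : List Char) (pos j : Nat) (h1 : pos ≤ j) (h2 : j < pvSkipWs cs pos) :
    pvWs.contains (cs.getD j ' ') = true := by
  fun_induction pvSkipWs cs pos with
  | case1 pos h' ih =>
    by_cases hj : j = pos
    · subst hj; exact h'.2
    · exact ih (by omega) h2
  | case2 pos h' => omega

lemma pvSkipWord_mid (cs : List Char) (pos j : Nat) (h1 : pos ≤ j) (h2 : j < pvSkipWord cs pos) :
    pvWs.contains (cs.getD j ' ') = false := by
  fun_induction pvSkipWord cs pos with
  | case1 pos h' ih =>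
    by_cases hj : j = pos
    · subst hj; exact h'.2
    · exact ih (by omega) h2
  | case2 pos h' => omega

lemma pvSkipWs_of_len_le (cs : List Char) (pos : Nat) (h : cs.length ≤ pos) :
    pvSkipWs cs pos = pos := by
  rw [pvSkipWs]
  simp [show ¬(pos < cs.length) by omega]

lemma pvSkipWord_of_len_le (cs : List Char) (pos : Nat) (h : cs.length ≤ pos) :
    pvSkipWord cs pos = pos := by
  rw [pvSkipWord]
  simp [show ¬(pos < cs.length) by omega]

lemma pvALoop_of_len_le (cs : List Char) (pos cw wi : Nat) (h : cs.length ≤ pos) :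
    pvALoop cs pos cw wi = pos := by
  rw [pvALoop]
  simp [show ¬(pos < cs.length) by omega]

lemma pvSkipWord_lt (cs : List Char) (pos : Nat) (h : pos < cs.length)
    (hw : pvWs.contains (cs.getD pos ' ') = false) : pos < pvSkipWord cs pos := by
  rw [pvSkipWord]
  have := pvSkipWord_ge cs (pos + 1)
  simp only [h, hw, and_self, dite_true]
  omega

-- the list of word starts reachable from `pos`, phrased with A's scanners
def pvTStarts (cs : List Char) (pos : Nat) : List Nat :=
  let i := pvSkipWs cs pos
  if h : i < cs.length then i :: pvTStarts cs (pvSkipWord cs i) else []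
termination_by cs.length - pos
decreasing_by
  have h1 := pvSkipWs_ge cs pos
  have h2 := pvSkipWord_lt cs (pvSkipWs cs pos) h (pvSkipWs_stop cs pos h)
  omega

-- A's whole computation is: the k-th entry of pvTStarts, defaulting to the length
lemma pvALoop_tstarts (cs : List Char) :
    ∀ (k pos cw wi : Nat), wi - cw = k → pos ≤ cs.length →
      pvSkipWs cs (pvALoop cs pos cw wi) = (pvTStarts cs pos).getD k cs.length := by
  intro k
  induction k with
  | zero =>
    intro pos cw wi hk hpos
    rw [pvALoop]
    simp only [show ¬(cw < wi) by omega, and_false]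
    rw [pvTStarts]
    by_cases h : pvSkipWs cs pos < cs.length
    · simp [h]
    · have := pvSkipWs_le_len cs pos hpos
      simp [h]
      omega
  | succ k ih =>
    intro pos cw wi hk hpos
    by_cases hp : pos < cs.length
    · rw [pvALoop]
      simp only [hp, show cw < wi by omega, and_self]
      rw [pvTStarts]
      by_cases h : pvSkipWs cs pos < cs.length
      · simp only [h, dite_true, List.getD_cons_succ]
        exact ih (pvSkipWord cs (pvSkipWs cs pos)) (cw + 1) wi (by omega)
          (pvSkipWord_le_len cs _ (by omega))
      · have hlen : pvSkipWs cs pos = cs.length := by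
          have := pvSkipWs_le_len cs pos hpos; omega
        have h1 : pvSkipWord cs (pvSkipWs cs pos) = cs.length := by
          rw [hlen]; exact pvSkipWord_of_len_le cs _ le_rfl
        rw [h1, pvALoop_of_len_le cs _ _ _ le_rfl]
        simp [h, pvSkipWs_of_len_le cs _ le_rfl, List.getD]
    · have : pos = cs.length := by omega
      subst this
      rw [pvALoop_of_len_le cs _ _ _ (le_refl _), pvSkipWs_of_len_le cs _ (le_refl _)]
      rw [pvTStarts]
      simp [pvSkipWs_of_len_le cs _ (le_refl _)]

-- Boolean "index n is a word start" on the full text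
def pvStartB (cs : List Char) (n : Nat) : Bool :=
  !pvWs.contains (cs.getD n ' ') && (n == 0 || pvWs.contains (cs.getD (n - 1) ' '))

lemma pvTStarts_filter (cs : List Char) :
    ∀ (f pos : Nat), cs.length - pos ≤ f → pos ≤ cs.length →
      (pos = 0 ∨ cs.length ≤ pos ∨ pvWs.contains (cs.getD (pos - 1) ' ') = true ∨
        pvWs.contains (cs.getD pos ' ') = true) →
      pvTStarts cs pos = (List.range' pos (cs.length - pos)).filter (pvStartB cs) := by
  intro f
  induction f with
  | zero =>
    intro pos hf hpos hC
    have hpl : pos = cs.length := by omega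
    rw [pvTStarts]
    simp [pvSkipWs_of_len_le cs pos (by omega), show ¬(pos < cs.length) by omega,
      show cs.length - pos = 0 by omega]
  | succ f ihf =>
    intro pos hf hpos hC
    have hi : pvSkipWs cs pos = pvSkipWs cs pos := rfl
    generalize hieq : pvSkipWs cs pos = i at *
    have hile : i ≤ cs.length := hieq ▸ pvSkipWs_le_len cs pos hpos
    have hpi : pos ≤ i := hieq ▸ pvSkipWs_ge cs pos
    have hsplit : List.range' pos (cs.length - pos) =
        List.range' pos (i - pos) ++ List.range' i (cs.length - i) := by
      have h := List.range'_append (s := pos) (m := i - pos) (n := cs.length - i) (step := 1)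
      rw [show pos + 1 * (i - pos) = i by omega,
        show (i - pos) + (cs.length - i) = cs.length - pos by omega] at h
      exact h.symm
    have hfilter1 : (List.range' pos (cs.length - pos)).filter (pvStartB cs) =
        (List.range' i (cs.length - i)).filter (pvStartB cs) := by
      rw [hsplit, List.filter_append]
      have : (List.range' pos (i - pos)).filter (pvStartB cs) = [] := by
        rw [List.filter_eq_nil_iff]
        intro j hj
        rw [List.mem_range'_1] at hj
        have hwj : pvWs.contains (cs.getD j ' ') = true :=
          pvSkipWs_mid cs pos j (by omega) (by omega)
        simp only [pvStartB, hwj, Bool.not_true, Bool.false_and]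
        simp
      rw [this, List.nil_append]
    rw [pvTStarts, hieq, hfilter1]
    by_cases hilen : i < cs.length
    · have hstop : pvWs.contains (cs.getD i ' ') = false := hieq ▸ pvSkipWs_stop cs pos (by omega)
      have hstart : pvStartB cs i = true := by
        unfold pvStartB
        rw [hstop]
        by_cases hi0 : i = 0
        · simp [hi0]
        · have hprev : pvWs.contains (cs.getD (i - 1) ' ') = true := by
            by_cases hip : pos < i
            · exact pvSkipWs_mid cs pos (i - 1) (by omega) (by omega)
            · have hip' : i = pos := by omega
              rcases hC with h0 | h0 | h0 | h0
              · omega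
              · omega
              · rw [hip']; exact h0
              · rw [hip'] at hstop; rw [hstop] at h0; exact absurd h0 (by simp)
          simp only [hprev, Bool.or_true, Bool.not_false, Bool.true_and]
      have hrange : List.range' i (cs.length - i) = i :: List.range' (i + 1) (cs.length - i - 1) := by
        conv_lhs => rw [show cs.length - i = (cs.length - i - 1) + 1 by omega, List.range'_succ]
      have hqi : i < pvSkipWord cs i := pvSkipWord_lt cs i hilen hstop
      have hqle : pvSkipWord cs i ≤ cs.length := pvSkipWord_le_len cs i hile
      have hsplit2 : List.range' (i + 1) (cs.length - i - 1) =
          List.range' (i + 1) (pvSkipWord cs i - (i + 1)) ++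
          List.range' (pvSkipWord cs i) (cs.length - pvSkipWord cs i) := by
        have h := List.range'_append (s := i + 1) (m := pvSkipWord cs i - (i + 1))
          (n := cs.length - pvSkipWord cs i) (step := 1)
        rw [show (i + 1) + 1 * (pvSkipWord cs i - (i + 1)) = pvSkipWord cs i by omega,
          show (pvSkipWord cs i - (i + 1)) + (cs.length - pvSkipWord cs i) = cs.length - i - 1 by omega] at h
        exact h.symm
      have hfilter2 : (List.range' (i + 1) (cs.length - i - 1)).filter (pvStartB cs) =
          (List.range' (pvSkipWord cs i) (cs.length - pvSkipWord cs i)).filter (pvStartB cs) := by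
        rw [hsplit2, List.filter_append]
        have : (List.range' (i + 1) (pvSkipWord cs i - (i + 1))).filter (pvStartB cs) = [] := by
          rw [List.filter_eq_nil_iff]
          intro j hj
          rw [List.mem_range'_1] at hj
          have hprev : pvWs.contains (cs.getD (j - 1) ' ') = false :=
            pvSkipWord_mid cs i (j - 1) (by omega) (by omega)
          have hj0 : (j == 0) = false := by simp; omega
          simp only [pvStartB, hprev, hj0, Bool.or_false, Bool.and_false]
          simp
        rw [this, List.nil_append]
      have hC' : pvSkipWord cs i = 0 ∨ cs.length ≤ pvSkipWord cs i ∨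
          pvWs.contains (cs.getD (pvSkipWord cs i - 1) ' ') = true ∨
          pvWs.contains (cs.getD (pvSkipWord cs i) ' ') = true := by
        by_cases hql : pvSkipWord cs i < cs.length
        · exact Or.inr (Or.inr (Or.inr (pvSkipWord_stop cs i (by omega))))
        · exact Or.inr (Or.inl (by omega))
      have ih := ihf (pvSkipWord cs i) (by omega) hqle hC'
      rw [hrange, List.filter_cons]
      simp only [hstart, if_true, hilen, dite_true]
      rw [hfilter2, ← ih]
    · have : cs.length - i = 0 := by omega
      simp [hilen, this]

lemma pvEnum_filter (cs : List Char) :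
    ∀ (l : List Char) (s : Nat), l = cs.drop s →
      (PySem.List.enumerate l (s : Int)).filterMap (pvStartB? cs) =
        ((List.range' s l.length).filter (pvStartB cs)).map (fun (n : Nat) => (n : Int)) := by
  intro l
  induction l with
  | nil => intro s _; simp [PySem.List.enumerate_nil]
  | cons c l' ihl =>
    intro s hdrop
    have hc : cs.getD s ' ' = c := by
      have h0 : (cs.drop s)[0]? = some c := by rw [← hdrop]; rfl
      rw [List.getElem?_drop] at h0
      simp only [Nat.add_zero] at h0
      simp [List.getD, h0]
    have hdrop' : cs.drop (s + 1) = l' := by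
      have h := congrArg (List.drop 1) hdrop
      simp only [List.drop_drop, List.drop_succ_cons, List.drop_zero] at h
      exact h.symm
    have hidx : (((s : Nat) : Int) - 1).toNat = s - 1 := by omega
    have hhead : pvStartB? cs ((s : Int), c) =
        if pvStartB cs s = true then some ((s : Int)) else none := by
      simp only [pvStartB?, pvStartB, hidx, hc]
      by_cases h1 : pvWs.contains c = false
      · by_cases h2 : s = 0
        · simp [h2]
        · simp [h2]
      · simp only [Bool.not_eq_false] at h1
        simp
    rw [PySem.List.enumerate_cons, List.filterMap_cons, hhead]
    have htail : PySem.List.enumerate l' ((s : Int) + 1) =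
        PySem.List.enumerate l' (((s + 1 : Nat) : Int)) := by push_cast; rfl
    have ih := ihl (s + 1) hdrop'.symm
    rw [htail, ih]
    simp only [List.length_cons]
    rw [List.range'_succ, List.filter_cons]
    by_cases hs : pvStartB cs s = true
    · simp [hs]
    · simp [hs]

-- ===== VERDICT (by name: the statement is the Claim_ definition above) =====
theorem find_word_position_py_spec : Claim_equal_find_word_position_py := by
  unfold Claim_equal_find_word_position_py
  intro text words wi _
  unfold Spec_find_word_position_py find_word_position_py find_word_position_py_alt
  by_cases hb : wi < 0 ∨ ((words.length : Int) ≤ wi)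
  · simp [hb]
  · have hwi : 0 ≤ wi := by omega
    simp only [hb, if_false]
    have hM := pvALoop_tstarts text.toList wi.toNat 0 0 wi.toNat (by omega) (by omega)
    have hT := pvTStarts_filter text.toList text.toList.length 0 (by omega) (by omega) (Or.inl rfl)
    have hE := pvEnum_filter text.toList text.toList 0 (by simp)
    rw [Nat.sub_zero] at hT
    simp only [Nat.cast_zero] at hE
    rw [hM, hT, hE, List.length_map]
    have hgen : ∀ (L : List Nat) (k d : Nat), k < L.length →
        ((L.getD k d : Nat) : Int) = (L.map (fun (n : Nat) => (n : Int))).getD k 0 := by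
      intro L k d hk
      simp [List.getD_eq_getElem?_getD, hk]
    set F := (List.range' 0 text.toList.length).filter (pvStartB text.toList) with hF
    by_cases hlt : wi.toNat < F.length
    · rw [if_pos (by omega)]
      exact hgen F wi.toNat text.toList.length hlt
    · rw [if_neg (by omega)]
      rw [List.getD_eq_default]
      omega
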